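-- pv_equiv track=rewrite | github.com/skrjha20/Chatbot-Voice | utilities.py | get_actual_planned
-- ===== SOURCE A (Python) =====
-- plan_type = ["plan", "planned","plant"]
--
-- actual_type = ["actual"]
--
-- def get_actual_planned(clean_words):
--     actual_planned = ''
--     for i in range(len(clean_words)):
--         if clean_words[i] in actual_type:
--             actual_planned = "actual"
--         if clean_words[i] in plan_type:
--             actual_planned = "planned"
--     if actual_planned == '':
--         actual_planned = "Unable to identify actual or planned, please specify again"
--     return actual_planned
-- ===== SOURCE B (Python) =====
-- plan_type = ["plan", "planned", "plant"]
--
-- actual_type = ["actual"]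
--
-- def get_actual_planned(clean_words):
--     for w in reversed(clean_words):
--         if w in plan_type:
--             return "planned"
--         if w in actual_type:
--             return "actual"
--     return "Unable to identify actual or planned, please specify again"
-- ===== Notes on version B (the rewrite author's own statement) =====
-- stated objective: alternative
-- what changed: B scans the word list in reverse and returns immediately on the first match (plan-type beats actual-type per word), instead of A's forward overwrite-and-continue accumulator; no word is in both keyword lists, so the last forward match equals the first reverse match.
import Mathlib
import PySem

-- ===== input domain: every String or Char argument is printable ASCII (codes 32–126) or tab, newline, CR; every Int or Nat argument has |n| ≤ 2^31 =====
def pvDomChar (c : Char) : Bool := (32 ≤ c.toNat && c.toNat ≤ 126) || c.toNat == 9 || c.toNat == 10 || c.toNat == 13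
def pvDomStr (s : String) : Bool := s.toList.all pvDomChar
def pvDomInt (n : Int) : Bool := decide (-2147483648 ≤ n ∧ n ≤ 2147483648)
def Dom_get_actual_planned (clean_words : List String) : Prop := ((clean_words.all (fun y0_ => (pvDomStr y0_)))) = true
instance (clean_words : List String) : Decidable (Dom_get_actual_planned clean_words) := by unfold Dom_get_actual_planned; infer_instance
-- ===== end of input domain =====

-- B replaces A's forward overwrite-and-continue accumulator with a reverse scan that
-- returns on the first matching word (objective: alternative decomposition, same cost).

-- ===== PORT A =====
def plan_type : List String := ["plan", "planned", "plant"]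

def actual_type : List String := ["actual"]

-- A's loop body: check actual_type first, then plan_type (the later check overwrites).
def get_actual_planned (clean_words : List String) : String :=
  let actual_planned :=
    clean_words.foldl
      (fun acc w =>
        let acc := if actual_type.contains w then "actual" else acc
        if plan_type.contains w then "planned" else acc)
      ""
  if actual_planned = "" then
    "Unable to identify actual or planned, please specify again"
  else actual_planned

-- ===== PORT B =====
-- B's reverse scan with early return.
def altGo : List String → String
  | [] => "Unable to identify actual or planned, please specify again"
  | w :: rest =>
    if plan_type.contains w then "planned"
    else if actual_type.contains w then "actual"
    else altGo rest

def get_actual_planned_alt (clean_words : List String) : String :=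
  altGo clean_words.reverse

-- ===== PRECONDITION & SPEC =====
def Spec_get_actual_planned (clean_words : List String) (out : String) : Prop := out = get_actual_planned_alt clean_words
instance (clean_words : List String) (out : String) : Decidable (Spec_get_actual_planned clean_words out) := by unfold Spec_get_actual_planned; infer_instance

-- ===== CLAIM (what is proved, stated in full; the proofs are below) =====
def Claim_equal_get_actual_planned : Prop := ∀ (clean_words : List String), Dom_get_actual_planned clean_words → Spec_get_actual_planned clean_words (get_actual_planned clean_words)

-- ===== LEMMAS AND PROOFS =====

theorem main_eq (l : List String) : get_actual_planned l = get_actual_planned_alt l := by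
  induction l using List.reverseRecOn with
  | nil => rfl
  | append_singleton l w ih =>
    simp only [get_actual_planned, get_actual_planned_alt, List.foldl_append, List.foldl_cons,
      List.foldl_nil, List.reverse_append, List.reverse_singleton, List.singleton_append,
      altGo] at *
    by_cases hp : w ∈ plan_type
    · simp [hp]
    · by_cases ha : w ∈ actual_type
      · simp [hp, ha]
      · simpa [hp, ha] using ih

-- ===== VERDICT (by name: the statement is the Claim_ definition above) =====
theorem get_actual_planned_spec : Claim_equal_get_actual_planned := by
  intro l _
  exact main_eq l
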